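-- pv_equiv track=rewrite | github.com/ST3LL/CHARPAK_S6-UE_Cryptographie | Message_5/crypto_5.py | separateur
-- ===== SOURCE A (Python) =====
-- def separateur(message, l_cle):
--     sep = []
--     for c in range(l_cle):
--         sous_sep = []
--         for e in range(c, len(message), l_cle): #pas de longueur de la clé
--             sous_sep.append(message[e])
--         sep.append(sous_sep)
--     return sep
-- ===== SOURCE B (Python) =====
-- def separateur(message, l_cle):
--     if l_cle <= 0:
--         return []
--     sep = [[] for _ in range(l_cle)]
--     col = 0
--     for ch in message:
--         sep[col].append(ch)
--         col += 1
--         if col == l_cle: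
--             col = 0
--     return sep
-- ===== Notes on version B (the rewrite author's own statement) =====
-- stated objective: alternative
-- what changed: Replaced A's per-column strided inner loops (one strided range pass over the message per key column) with a single round-robin pass that distributes each element into its column bucket via a cycling counter.
import Mathlib
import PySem

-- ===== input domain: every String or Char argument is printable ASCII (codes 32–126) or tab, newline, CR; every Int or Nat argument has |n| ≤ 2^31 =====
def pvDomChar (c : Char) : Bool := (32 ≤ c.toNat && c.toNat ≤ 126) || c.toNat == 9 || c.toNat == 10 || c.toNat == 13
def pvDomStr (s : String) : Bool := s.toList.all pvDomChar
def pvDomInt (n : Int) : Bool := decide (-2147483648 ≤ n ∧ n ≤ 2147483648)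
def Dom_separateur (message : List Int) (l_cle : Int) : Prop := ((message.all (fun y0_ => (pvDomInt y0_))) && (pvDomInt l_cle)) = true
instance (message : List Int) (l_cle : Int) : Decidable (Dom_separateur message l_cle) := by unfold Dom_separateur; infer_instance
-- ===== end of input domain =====

-- B replaces A's per-column strided inner loops with a single round-robin pass
-- distributing each element into its column bucket (objective: alternative).

-- ===== PORT A =====
-- message[e] is always in range here (0 ≤ e < len(message) by the range bounds),
-- so pyGetD's default 0 is never used.
def separateur (message : List Int) (l_cle : Int) : List (List Int) :=
  (PySem.List.pyRange 0 l_cle 1).foldl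
    (fun sep c =>
      sep ++ [(PySem.List.pyRange c (message.length : Int) l_cle).foldl
        (fun sous_sep e => sous_sep ++ [PySem.List.pyGetD message e 0]) []])
    []

-- ===== PORT B =====
def separateur_alt (message : List Int) (l_cle : Int) : List (List Int) :=
  if l_cle ≤ 0 then []
  else
    (message.foldl
      (fun (st : List (List Int) × Nat) ch =>
        let sep := st.1.set st.2 (st.1.getD st.2 [] ++ [ch])
        let col := st.2 + 1
        (sep, if (col : Int) = l_cle then 0 else col))
      (List.replicate l_cle.toNat [], 0)).1

-- ===== PRECONDITION & SPEC =====
def Spec_separateur (message : List Int) (l_cle : Int) (out : List (List Int)) : Prop := out = separateur_alt message l_cle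
instance (message : List Int) (l_cle : Int) (out : List (List Int)) : Decidable (Spec_separateur message l_cle out) := by unfold Spec_separateur; infer_instance

-- ===== CLAIM (what is proved, stated in full; the proofs are below) =====
def Claim_equal_separateur : Prop := ∀ (message : List Int) (l_cle : Int), Dom_separateur message l_cle → Spec_separateur message l_cle (separateur message l_cle)

-- ===== LEMMAS AND PROOFS =====

-- Common specification: the column of a message obtained by taking every k-th element.
def colGather (k : Nat) : List Int → List Int
  | [] => []
  | x :: xs => x :: colGather k (xs.drop (k - 1))
termination_by l => l.length
decreasing_by simp only [List.length_drop, List.length_cons]; omega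

theorem colGather_nil (k : Nat) : colGather k [] = [] := by unfold colGather; rfl

theorem colGather_cons (k : Nat) (x : Int) (xs : List Int) :
    colGather k (x :: xs) = x :: colGather k (xs.drop (k - 1)) := by rw [colGather.eq_2]

-- What B's cycling counter collects into bucket c, starting from counter value col.
def pickCnt (k c : Nat) : Nat → List Int → List Int
  | _, [] => []
  | col, x :: xs =>
      let col' := if col + 1 = k then 0 else col + 1
      if col = c then x :: pickCnt k c col' xs else pickCnt k c col' xs

-- pyRange with a positive step, cons form.
theorem pyRange_pos_cons (a b s : Int) (hs : 0 < s) (hab : a < b) :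
    PySem.List.pyRange a b s = a :: PySem.List.pyRange (a + s) b s := by
  rw [PySem.List.pyRange_of_pos a b hs, PySem.List.pyRange_of_pos (a + s) b hs]
  have key : (b - a + s - 1) / s = (b - (a + s) + s - 1) / s + 1 := by
    have h : b - a + s - 1 = (b - (a + s) + s - 1) + 1 * s := by ring
    rw [h, Int.add_mul_ediv_right _ _ (by omega : s ≠ 0)]
  by_cases h2 : a + s < b
  · rw [if_pos hab, if_pos h2, key]
    have hnn : 0 ≤ (b - (a + s) + s - 1) / s := by
      apply Int.ediv_nonneg <;> omega
    rw [show ((b - (a + s) + s - 1) / s + 1).toNat = ((b - (a + s) + s - 1) / s).toNat + 1 by omega]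
    rw [List.range_succ_eq_map, List.map_cons, List.map_map]
    simp only [Nat.cast_zero, mul_zero, add_zero, List.cons.injEq, true_and]
    apply List.map_congr_left
    intro k _
    simp only [Function.comp_apply]
    push_cast
    ring
  · rw [if_pos hab, if_neg h2]
    have hz : (b - (a + s) + s - 1) / s = 0 := by
      apply Int.ediv_eq_zero_of_lt <;> omega
    rw [key, hz]
    simp

-- pyRange with a positive step is empty when the bounds are crossed.
theorem pyRange_pos_nil (a b s : Int) (hs : 0 < s) (hab : b ≤ a) :
    PySem.List.pyRange a b s = [] := by
  rw [PySem.List.pyRange_of_pos a b hs, if_neg (by omega)]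
  simp

-- A's inner strided gather equals colGather on the dropped suffix.
theorem mapA (message : List Int) (s : Int) (hs : 0 < s) :
    ∀ (fuel : Nat) (c : Int), 0 ≤ c → message.length - c.toNat ≤ fuel →
      (PySem.List.pyRange c (message.length : Int) s).map (fun e => PySem.List.pyGetD message e 0)
        = colGather s.toNat (message.drop c.toNat) := by
  intro fuel
  induction fuel with
  | zero =>
      intro c hc hf
      have hge : (message.length : Int) ≤ c := by omega
      rw [pyRange_pos_nil c _ s hs hge, List.drop_eq_nil_of_le (by omega), colGather_nil]
      rfl
  | succ n ih =>
      intro c hc hf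
      by_cases hlt : c < (message.length : Int)
      · rw [pyRange_pos_cons c _ s hs hlt, List.map_cons]
        have hcl : c.toNat < message.length := by omega
        have hdrop : message.drop c.toNat = message[c.toNat] :: message.drop (c.toNat + 1) :=
          List.drop_eq_getElem_cons hcl
        rw [hdrop, colGather_cons,
            PySem.List.pyGetD_eq_getElem message 0 hc (by exact_mod_cast hlt),
            List.drop_drop,
            ih (c + s) (by omega) (by omega),
            show (c + s).toNat = c.toNat + 1 + (s.toNat - 1) by omega]
      · rw [pyRange_pos_nil c _ s hs (by omega), List.drop_eq_nil_of_le (by omega), colGather_nil]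
        rfl

-- What the cycling counter routes to bucket c is the colGather column starting at the
-- cyclic distance from col to c.
theorem pickCnt_eq_colGather (k : Nat) (hk : 0 < k) :
    ∀ (msg : List Int) (c col : Nat), c < k → col < k →
      pickCnt k c col msg = colGather k (msg.drop (if col ≤ c then c - col else c + k - col)) := by
  intro msg
  induction msg with
  | nil => intro c col _ _; simp [pickCnt, colGather_nil]
  | cons x xs ih =>
      intro c col hc hcol
      simp only [pickCnt]
      by_cases hce : col = c
      · subst hce
        rw [if_pos rfl,
            show (if col ≤ col then col - col else col + k - col) = 0 by split <;> omega,
            List.drop_zero, colGather_cons]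
        by_cases hk1 : col + 1 = k
        · rw [if_pos hk1, ih col 0 hc hk,
              show (if (0:Nat) ≤ col then col - 0 else col + k - 0) = k - 1 by split <;> omega]
        · rw [if_neg hk1, ih col (col + 1) hc (by omega),
              show (if col + 1 ≤ col then col - (col + 1) else col + k - (col + 1)) = k - 1 by
                split <;> omega]
      · rw [if_neg hce]
        by_cases hlc : col ≤ c
        · rw [show (if col ≤ c then c - col else c + k - col) = c - col - 1 + 1 by split <;> omega,
              List.drop_succ_cons]
          by_cases hk1 : col + 1 = k
          · exact absurd (by omega : col = c) hce
          · rw [if_neg hk1, ih c (col + 1) hc (by omega),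
                show (if col + 1 ≤ c then c - (col + 1) else c + k - (col + 1)) = c - col - 1 by
                  split <;> omega]
        · rw [show (if col ≤ c then c - col else c + k - col) = c + k - col - 1 + 1 by
                split <;> omega,
              List.drop_succ_cons]
          by_cases hk1 : col + 1 = k
          · rw [if_pos hk1, ih c 0 hc hk,
                show (if (0:Nat) ≤ c then c - 0 else c + k - 0) = c + k - col - 1 by split <;> omega]
          · rw [if_neg hk1, ih c (col + 1) hc (by omega),
                show (if col + 1 ≤ c then c - (col + 1) else c + k - (col + 1)) = c + k - col - 1 by
                  split <;> omega]

-- B's fold invariant: bucket c of the result is its initial content followed by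
-- what the cycling counter routes to c.
theorem foldB (l_cle : Int) (hl : 0 < l_cle) :
    ∀ (msg : List Int) (s : List (List Int)) (col : Nat),
      s.length = l_cle.toNat → col < l_cle.toNat →
      (msg.foldl
        (fun (st : List (List Int) × Nat) ch =>
          let sep := st.1.set st.2 (st.1.getD st.2 [] ++ [ch])
          let c2 := st.2 + 1
          (sep, if (c2 : Int) = l_cle then 0 else c2))
        (s, col)).1
      = (List.range l_cle.toNat).map (fun c => s.getD c [] ++ pickCnt l_cle.toNat c col msg) := by
  intro msg
  induction msg with
  | nil =>
      intro s col hs hcol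
      simp only [List.foldl_nil]
      apply List.ext_getElem
      · simp [hs]
      · intro i h1 h2
        simp only [List.getElem_map, List.getElem_range, pickCnt, List.append_nil]
        rw [List.getD_eq_getElem s [] (by omega)]
  | cons x xs ih =>
      intro s col hs hcol
      simp only [List.foldl_cons]
      have hcol' : (if ((col + 1 : Nat) : Int) = l_cle then 0 else col + 1)
          = (if col + 1 = l_cle.toNat then 0 else col + 1) := by
        by_cases h : col + 1 = l_cle.toNat
        · rw [if_pos (by omega), if_pos h]
        · rw [if_neg (by omega), if_neg h]
      rw [hcol',
          ih (s.set col (s.getD col [] ++ [x])) (if col + 1 = l_cle.toNat then 0 else col + 1)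
            (by rw [List.length_set]; exact hs) (by split <;> omega)]
      apply List.map_congr_left
      intro c hcmem
      have hck : c < l_cle.toNat := List.mem_range.mp hcmem
      simp only [pickCnt]
      by_cases hce : col = c
      · subst hce
        rw [if_pos rfl,
            List.getD_eq_getElem (s.set col (s.getD col [] ++ [x])) [] (by rw [List.length_set, hs]; omega),
            List.getElem_set_self (by rw [List.length_set, hs]; omega), List.getD_eq_getElem s [] (by omega),
            List.append_assoc]
        rfl
      · rw [if_neg hce,
            List.getD_eq_getElem (s.set col (s.getD col [] ++ [x])) [] (by rw [List.length_set, hs]; omega),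
            List.getElem_set_ne (by omega) (by rw [List.length_set, hs]; omega),
            List.getD_eq_getElem s [] (n := c) (by omega)]

-- Both sides, l_cle > 0: each column equals the corresponding colGather column.
theorem sides_eq (message : List Int) (l_cle : Int) (hl : 0 < l_cle) :
    separateur message l_cle = separateur_alt message l_cle := by
  unfold separateur separateur_alt
  rw [if_neg (by omega),
      foldB l_cle hl message (List.replicate l_cle.toNat []) 0 (by simp) (by omega),
      PySem.List.foldl_append_singleton_eq_map, List.nil_append,
      PySem.List.pyRange_one 0 l_cle, List.map_map, Int.sub_zero]
  apply List.map_congr_left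
  intro c hcmem
  have hck : c < l_cle.toNat := by
    have := List.mem_range.mp hcmem
    omega
  simp only [Function.comp_apply, zero_add]
  rw [PySem.List.foldl_append_singleton_eq_map, List.nil_append,
      mapA message l_cle hl message.length (c : Int) (by omega) (by omega),
      pickCnt_eq_colGather l_cle.toNat (by omega) message c 0 hck (by omega),
      show (if (0:Nat) ≤ c then c - 0 else c + l_cle.toNat - 0) = c by split <;> omega,
      List.getD_eq_getElem _ [] (by simpa using hck), List.getElem_replicate,
      List.nil_append, Int.toNat_natCast]

-- ===== VERDICT (by name: the statement is the Claim_ definition above) =====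
theorem separateur_spec : Claim_equal_separateur := by
  intro message l_cle _
  unfold Spec_separateur
  by_cases hl : 0 < l_cle
  · exact sides_eq message l_cle hl
  · unfold separateur separateur_alt
    rw [if_pos (by omega), PySem.List.pyRange_one_eq_nil (by omega)]
    rfl
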